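-- pv_equiv track=rewrite | github.com/shawn365/Algorithm | 프로그래머스/0/120842. 2차원으로 만들기/2차원으로 만들기.py | solution
-- ===== SOURCE A (Python) =====
-- def solution(num_list, n):
--     answer = []
--     temp = []
--     for i in num_list:
--         temp.append(i)
--         if len(temp) == n:
--             answer.append(temp)
--             temp = []
--
--     return answer
-- ===== SOURCE B (Python) =====
-- def solution(num_list, n):
--     if n <= 0:
--         return []
--     return [num_list[k*n:(k+1)*n] for k in range(len(num_list) // n)]
-- ===== Notes on version B (the rewrite author's own statement) =====
-- stated objective: simpler
-- what changed: B replaces A's element-by-element accumulation into a temp buffer (flushed whenever it reaches length n) by computing the number of complete rows with integer division and slicing each row directly out of the input; for n <= 0 it returns [] directly, matching A's never-flushing loop. (bulk slicing avoids per-element append/flush work)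
import Mathlib
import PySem

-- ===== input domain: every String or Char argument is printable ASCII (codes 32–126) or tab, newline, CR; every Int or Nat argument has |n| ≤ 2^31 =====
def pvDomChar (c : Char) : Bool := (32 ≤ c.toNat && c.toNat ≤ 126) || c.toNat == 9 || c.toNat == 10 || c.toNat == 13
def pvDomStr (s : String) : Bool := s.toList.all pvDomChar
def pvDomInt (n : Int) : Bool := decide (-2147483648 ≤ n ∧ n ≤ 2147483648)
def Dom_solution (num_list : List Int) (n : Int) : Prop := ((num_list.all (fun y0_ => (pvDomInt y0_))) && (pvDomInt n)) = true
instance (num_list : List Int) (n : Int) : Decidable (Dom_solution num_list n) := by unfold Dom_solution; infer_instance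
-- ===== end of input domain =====

-- B reshapes by slicing len//n complete rows directly out of the list (returning [] outright
-- for n <= 0) instead of accumulating and flushing a temp buffer (objective: simpler).


-- ===== PORT A =====
-- one loop step of A: temp.append(i); if len(temp) == n, flush temp into answer
def solStep (n : Int) (st : List (List Int) × List Int) (i : Int) : List (List Int) × List Int :=
  let temp := st.2 ++ [i]
  if (temp.length : Int) = n then (st.1 ++ [temp], []) else (st.1, temp)

def solution (num_list : List Int) (n : Int) : List (List Int) :=
  (num_list.foldl (solStep n) ([], [])).1

-- ===== PORT B =====
def solution_alt (num_list : List Int) (n : Int) : List (List Int) :=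
  if n ≤ 0 then []
  else
    (PySem.List.pyRange 0 (PySem.Int.floordiv (num_list.length : Int) n) 1).map
      (fun k => PySem.List.slice num_list (some (k * n)) (some ((k + 1) * n)))

-- ===== PRECONDITION & SPEC =====
def Spec_solution (num_list : List Int) (n : Int) (out : List (List Int)) : Prop := out = solution_alt num_list n
instance (num_list : List Int) (n : Int) (out : List (List Int)) : Decidable (Spec_solution num_list n out) := by unfold Spec_solution; infer_instance

-- ===== CLAIM (what is proved, stated in full; the proofs are below) =====
def Claim_equal_solution : Prop := ∀ (num_list : List Int) (n : Int), Dom_solution num_list n → Spec_solution num_list n (solution num_list n)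

-- ===== LEMMAS AND PROOFS =====

-- A with n ≤ 0 never flushes: the answer stays as it was
theorem aLoop_nonpos (n : Int) (hn : n ≤ 0) :
    ∀ (xs temp : List Int) (answer : List (List Int)),
      (xs.foldl (solStep n) (answer, temp)).1 = answer := by
  intro xs
  induction xs with
  | nil => intro temp answer; rfl
  | cons x rest ih =>
      intro temp answer
      have hne : (((temp ++ [x]).length : Nat) : Int) ≠ n := by
        simp [List.length_append]; omega
      simp only [List.foldl_cons, solStep, if_neg hne]
      exact ih (temp ++ [x]) answer

-- A with a too-short remainder never flushes either
theorem aLoop_short (n : Int) :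
    ∀ (xs temp : List Int) (answer : List (List Int)),
      ((temp.length + xs.length : Nat) : Int) < n →
      (xs.foldl (solStep n) (answer, temp)).1 = answer := by
  intro xs
  induction xs with
  | nil => intro temp answer _; rfl
  | cons x rest ih =>
      intro temp answer h
      have hne : (((temp ++ [x]).length : Nat) : Int) ≠ n := by
        simp only [List.length_cons] at h
        simp [List.length_append]; omega
      simp only [List.foldl_cons, solStep, if_neg hne]
      apply ih
      simp only [List.length_cons] at h
      simp [List.length_append]; omega

-- A fills temp with the next j elements and flushes exactly when it reaches length n
theorem aLoop_fill (n : Int) :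
    ∀ (j : Nat) (xs temp : List Int) (answer : List (List Int)),
      1 ≤ j → ((temp.length + j : Nat) : Int) = n → j ≤ xs.length →
      xs.foldl (solStep n) (answer, temp)
        = (xs.drop j).foldl (solStep n) (answer ++ [temp ++ xs.take j], []) := by
  intro j
  induction j with
  | zero => intro xs temp answer h1; omega
  | succ j' ih =>
      intro xs temp answer _ hlen hle
      match xs with
      | [] => simp at hle
      | x :: rest =>
        simp only [List.foldl_cons, solStep]
        by_cases hj : j' = 0
        · subst hj
          have hc : (((temp ++ [x]).length : Nat) : Int) = n := by
            simp [List.length_append]; omega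
          rw [if_pos hc]
          simp
        · have hc : (((temp ++ [x]).length : Nat) : Int) ≠ n := by
            simp [List.length_append]; omega
          rw [if_neg hc]
          have := ih rest (temp ++ [x]) answer (by omega)
            (by simp [List.length_append]; push_cast at hlen ⊢; omega)
            (by simp at hle; omega)
          simpa [List.append_assoc] using this

-- B with 0 ≤ len < n: zero rows
theorem alt_zero (xs : List Int) (n : Int) (hn : 0 < n) (hlen : (xs.length : Int) < n) :
    solution_alt xs n = [] := by
  have hq : PySem.Int.floordiv (xs.length : Int) n = 0 := by
    rw [PySem.Int.floordiv_eq_iff_of_pos hn]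
    constructor <;> omega
  simp [solution_alt, hq, PySem.List.pyRange_one_eq_nil (le_refl 0), not_le.mpr hn]

-- shifting a full-row slice past the first row
theorem slice_shift (xs : List Int) (n : Int) (hn : 0 < n) (k : Nat) :
    PySem.List.slice xs (some ((1 + (k : Int)) * n)) (some ((1 + (k : Int) + 1) * n))
      = PySem.List.slice (xs.drop n.toNat) (some ((k : Int) * n)) (some (((k : Int) + 1) * n)) := by
  have hk : (0 : Int) ≤ (k : Int) * n := mul_nonneg (Int.natCast_nonneg k) hn.le
  have h1 : (1 + (k : Int)) * n = n + (k : Int) * n := by ring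
  have h2 : (1 + (k : Int) + 1) * n = n + ((k : Int) * n + n) := by ring
  have h3 : ((k : Int) + 1) * n = (k : Int) * n + n := by ring
  rw [PySem.List.slice_toNat _ (by omega) (by nlinarith),
      PySem.List.slice_toNat _ (by omega) (by nlinarith),
      h1, h2, h3,
      Int.toNat_add (by omega) (by omega), Int.toNat_add (by omega) (by omega),
      Int.toNat_add (by omega) (by omega), List.drop_drop]
  congr 1 ; omega

-- B peels off its first (complete) row
theorem alt_cons (xs : List Int) (n : Int) (hn : 0 < n) (hlen : n ≤ (xs.length : Int)) :
    solution_alt xs n = xs.take n.toNat :: solution_alt (xs.drop n.toNat) n := by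
  have hdroplen : ((xs.drop n.toNat).length : Int) = (xs.length : Int) - n := by
    simp [List.length_drop]; omega
  have hrows : PySem.Int.floordiv (xs.length : Int) n
      = PySem.Int.floordiv ((xs.drop n.toNat).length : Int) n + 1 := by
    rw [PySem.Int.floordiv_eq_ediv_of_pos hn, PySem.Int.floordiv_eq_ediv_of_pos hn, hdroplen]
    conv_lhs => rw [show (xs.length : Int) = ((xs.length : Int) - n) + 1 * n from by ring,
      Int.add_mul_ediv_right _ _ (by omega : n ≠ 0)]
  have hr0 : 0 ≤ PySem.Int.floordiv ((xs.drop n.toNat).length : Int) n := by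
    have h := PySem.Int.floordiv_mul_add_mod ((xs.drop n.toNat).length : Int) n
    have hb1 := PySem.Int.mod_nonneg (a := ((xs.drop n.toNat).length : Int)) hn
    have hb2 := PySem.Int.mod_lt (a := ((xs.drop n.toNat).length : Int)) hn
    nlinarith [Int.natCast_nonneg (xs.drop n.toNat).length]
  set r := PySem.Int.floordiv ((xs.drop n.toNat).length : Int) n with hr
  simp only [solution_alt, if_neg (not_le.mpr hn), hrows]
  rw [PySem.List.pyRange_one_cons (by omega)]
  simp only [List.map_cons]
  congr 1
  · rw [zero_mul]
    simp only [PySem.List.slice_zero_start]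
    rw [zero_add, one_mul, PySem.List.slice_to _ hn.le]
  · rw [← hr, zero_add, PySem.List.pyRange_one (1 : Int), PySem.List.pyRange_one (0 : Int)]
    have : ((r + 1) - 1 : Int) = r - 0 := by ring
    rw [this]
    simp only [List.map_map]
    apply List.map_congr_left
    intro k _
    simp only [Function.comp_apply, zero_add]
    exact slice_shift xs n hn k

-- main loop/slice correspondence for positive n, by strong induction on the length
theorem main_pos (n : Int) (hn : 0 < n) :
    ∀ (len : Nat) (xs : List Int), xs.length = len → ∀ (answer : List (List Int)),
      (xs.foldl (solStep n) (answer, [])).1 = answer ++ solution_alt xs n := by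
  intro len
  induction len using Nat.strong_induction_on with
  | _ len ih =>
      intro xs hxs answer
      by_cases hcase : (xs.length : Int) < n
      · rw [aLoop_short n xs [] answer (by simpa using hcase), alt_zero xs n hn hcase,
            List.append_nil]
      · rw [not_lt] at hcase
        have hm1 : 1 ≤ n.toNat := by omega
        have hmle : n.toNat ≤ xs.length := by omega
        rw [aLoop_fill n n.toNat xs [] answer hm1 (by simp; omega) hmle]
        have hlt : (xs.drop n.toNat).length < len := by
          simp [List.length_drop]; omega
        rw [ih _ hlt (xs.drop n.toNat) rfl, alt_cons xs n hn hcase]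
        simp

-- ===== VERDICT (by name: the statement is the Claim_ definition above) =====
theorem solution_spec : Claim_equal_solution := by
  intro xs n _
  unfold Spec_solution solution
  by_cases hn : n ≤ 0
  · rw [aLoop_nonpos n hn xs [] []]
    simp [solution_alt, hn]
  · rw [not_le] at hn
    simpa using main_pos n hn xs.length xs rfl []
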